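-- pv_equiv track=rewrite | github.com/Teja079/CropGro2 | Read.py | find
-- ===== SOURCE A (Python) =====
-- def find(lines:list, section: str, targ_inst:int = 1):
--     """
--     Searches for a specific section in an array of lines.
--     Parameters:
--     - lines: A list of strings, each representing a line from a file.
--     - section: A string representing the section header to search for
--     Returns:
--     - lnum: The line number where the section is found.
--     - found: A boolean indicating whether the section was found.
--
--     Raises:
--     - ValueError: If the section is not found in the lines.
--     """
--     found = False
--     inst = 0
--     for lnum, line in enumerate(lines):
--         if line.strip().startswith(section):
--             inst += 1
--             if inst == targ_inst:
--                 found = True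
--                 return lnum, found  # Return the line number and found status
--
--     # Raise an error if the section is not found
--     raise ValueError(f"Section {section} not found in the provided lines.")
-- ===== SOURCE B (Python) =====
-- def find(lines: list, section: str, targ_inst: int = 1):
--     # Prefix-count array + binary search: cum[k] = number of matching headers
--     # among the first k lines; the answer is the least i with cum[i+1] >= targ_inst,
--     # located by binary search on the monotone cum array.
--     cum = [0]
--     for line in lines:
--         cum.append(cum[-1] + (1 if line.strip().startswith(section) else 0))
--     if targ_inst >= 1 and cum[-1] >= targ_inst:
--         lo, hi = 0, len(lines) - 1
--         while lo < hi:
--             mid = (lo + hi) // 2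
--             if cum[mid + 1] >= targ_inst:
--                 hi = mid
--             else:
--                 lo = mid + 1
--         return lo, True
--     raise ValueError(f"Section {section} not found in the provided lines.")
-- ===== Notes on version B (the rewrite author's own statement) =====
-- stated objective: alternative
-- what changed: Replaces the counting scan with an early return by a monotone prefix-count array over the lines plus a binary search on it for the first index whose cumulative match count reaches targ_inst.
import Mathlib
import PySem

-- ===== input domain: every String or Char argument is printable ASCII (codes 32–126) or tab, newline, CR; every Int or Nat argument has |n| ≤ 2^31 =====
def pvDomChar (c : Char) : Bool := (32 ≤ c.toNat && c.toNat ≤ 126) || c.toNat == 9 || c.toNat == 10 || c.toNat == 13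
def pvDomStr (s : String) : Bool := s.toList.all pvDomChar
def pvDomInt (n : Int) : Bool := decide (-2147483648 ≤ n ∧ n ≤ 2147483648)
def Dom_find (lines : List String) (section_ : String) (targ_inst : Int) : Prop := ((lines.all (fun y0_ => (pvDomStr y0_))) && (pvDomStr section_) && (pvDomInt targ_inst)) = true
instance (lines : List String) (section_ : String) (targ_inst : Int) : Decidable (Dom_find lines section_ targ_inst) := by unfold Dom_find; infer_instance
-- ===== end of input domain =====

-- B builds a monotone prefix-count array and binary-searches it for the first index whose cumulative match count reaches targ_inst; A counts with an early-returning scan. Return-value equivalence on Pre_ (both raise the same ValueError outside it).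

-- line.strip().startswith(section), shared by both ports
def isSec (section_ line : String) : Bool := PySem.Str.startswith (PySem.Str.strip line) section_

-- ===== PORT A =====
-- the for-loop over enumerate(lines) with the running counter `inst`; `none` = falls through to the raise
def findLoop (section_ : String) (targ_inst : Int) : List (Int × String) → Int → Option (Int × Bool)
  | [], _ => none
  | (lnum, line) :: rest, inst =>
    if isSec section_ line then
      if inst + 1 = targ_inst then some (lnum, true)
      else findLoop section_ targ_inst rest (inst + 1)
    else findLoop section_ targ_inst rest inst

def find (lines : List String) (section_ : String) (targ_inst : Int) : Int × Bool :=
  (findLoop section_ targ_inst (PySem.List.enumerate lines 0) 0).getD (0, false)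

-- ===== PORT B =====
-- the while-loop 'while lo < hi: mid = (lo+hi)//2; …' of Source B
def bsearch (cum : List Int) (t : Int) (lo hi : Int) : Int :=
  if h : lo < hi then
    let mid := PySem.Int.floordiv (lo + hi) 2
    if (PySem.List.pyGet? cum (mid + 1)).getD 0 ≥ t then bsearch cum t lo mid
    else bsearch cum t (mid + 1) hi
  else lo
termination_by (hi - lo).toNat
decreasing_by
  · have := (PySem.Int.floordiv_two_mid_bounds (le_of_lt h)).2
    have h2 : PySem.Int.floordiv (lo + hi) 2 < hi := by
      rw [PySem.Int.floordiv_eq_ediv_of_pos (by omega)]; omega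
    omega
  · have := (PySem.Int.floordiv_two_mid_bounds (le_of_lt h)).1
    omega

def find_alt (lines : List String) (section_ : String) (targ_inst : Int) : Int × Bool :=
  let cum := lines.foldl
    (fun c line => c ++ [(PySem.List.pyGet? c (-1)).getD 0 + (if isSec section_ line then 1 else 0)])
    [0]
  if 1 ≤ targ_inst ∧ targ_inst ≤ (PySem.List.pyGet? cum (-1)).getD 0 then
    (bsearch cum targ_inst 0 ((lines.length : Int) - 1), true)
  else (0, false)  -- Python B raises ValueError here (outside Pre_)

-- ===== PRECONDITION & SPEC =====
-- Pre_find: exactly the inputs on which A returns (targ_inst ≥ 1 and at least targ_inst matching lines); A raises ValueError otherwise, and B raises the identical ValueError there.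
def Pre_find (lines : List String) (section_ : String) (targ_inst : Int) : Prop :=
  1 ≤ targ_inst ∧ targ_inst ≤ ((lines.countP (fun l => isSec section_ l)) : Int)
instance (lines : List String) (section_ : String) (targ_inst : Int) : Decidable (Pre_find lines section_ targ_inst) := by unfold Pre_find; infer_instance

def pvWitness_find : List String × String × Int := (["*HEADER ONE", "  data", "*HEADER TWO"], "*HEADER", 2)

def Spec_find (lines : List String) (section_ : String) (targ_inst : Int) (out : Int × Bool) : Prop := out = find_alt lines section_ targ_inst
instance (lines : List String) (section_ : String) (targ_inst : Int) (out : Int × Bool) : Decidable (Spec_find lines section_ targ_inst out) := by unfold Spec_find; infer_instance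

-- ===== CLAIM (what is proved, stated in full; the proofs are below) =====
def Claim_equal_find : Prop := ∀ (lines : List String) (section_ : String) (targ_inst : Int), Dom_find lines section_ targ_inst → Pre_find lines section_ targ_inst → Spec_find lines section_ targ_inst (find lines section_ targ_inst)

-- ===== LEMMAS AND PROOFS =====

-- cnt s ls k = number of matching lines among the first k
def cnt (section_ : String) (ls : List String) (k : Nat) : Nat :=
  (ls.take k).countP (fun l => isSec section_ l)

theorem cnt_zero (s : String) (ls : List String) : cnt s ls 0 = 0 := rfl

theorem cnt_mono (s : String) (ls : List String) {j k : Nat} (h : j ≤ k) : cnt s ls j ≤ cnt s ls k := by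
  unfold cnt
  rw [show ls.take j = (ls.take k).take j from by rw [List.take_take, Nat.min_eq_left h]]
  exact List.Sublist.countP_le (List.take_sublist _ _)

-- the scan of A lands exactly on the index i where the cumulative count first reaches targ_inst
theorem loopA (s : String) (t : Int) :
    ∀ (ls : List String) (j inst : Int) (i : Nat),
      inst < t →
      inst + (cnt s ls i : Int) < t →
      t ≤ inst + (cnt s ls (i + 1) : Int) →
      findLoop s t (PySem.List.enumerate ls j) inst = some (j + i, true) := by
  intro ls
  induction ls with
  | nil =>
    intro j inst i _ h1 h2
    simp only [cnt, List.take_nil, List.countP_nil] at h1 h2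
    omega
  | cons x rest ih =>
    intro j inst i hlt h1 h2
    rw [PySem.List.enumerate_cons]
    rw [show findLoop s t ((j, x) :: PySem.List.enumerate rest (j + 1)) inst =
        (if isSec s x then (if inst + 1 = t then some (j, true)
          else findLoop s t (PySem.List.enumerate rest (j + 1)) (inst + 1))
         else findLoop s t (PySem.List.enumerate rest (j + 1)) inst) from rfl]
    by_cases hp : isSec s x
    · rw [if_pos hp]
      have hc : ∀ k : Nat, cnt s (x :: rest) (k + 1) = cnt s rest k + 1 := by
        intro k; simp only [cnt, List.take_succ_cons, List.countP_cons, hp, if_true]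
      by_cases ht : inst + 1 = t
      · rw [if_pos ht]
        -- i must be 0 here
        rcases i with _ | i'
        · simp
        · exfalso
          have : cnt s (x :: rest) 1 ≤ cnt s (x :: rest) (i' + 1) := cnt_mono s _ (by omega)
          have h01 : cnt s (x :: rest) 1 = 1 := by
            have := hc 0; simp [cnt] at this ⊢; omega
          omega
      · rw [if_neg ht]
        rcases i with _ | i'
        · exfalso
          have h01 : (cnt s (x :: rest) 1 : Int) = 1 := by
            have := hc 0; rw [this, cnt_zero]; simp
          rw [h01] at h2; omega
        · have := ih (j + 1) (inst + 1) i' (by omega)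
            (by rw [hc i'] at h1; push_cast at h1 ⊢; omega)
            (by rw [hc (i' + 1)] at h2; push_cast at h2 ⊢; omega)
          rw [this]; congr 1; push_cast; ring_nf
    · rw [if_neg hp]
      have hc : ∀ k : Nat, cnt s (x :: rest) (k + 1) = cnt s rest k := by
        intro k
        simp only [cnt, List.take_succ_cons, List.countP_cons]
        have hp' : isSec s x = false := by simpa using hp
        simp [hp']
      rcases i with _ | i'
      · exfalso
        have h01 : (cnt s (x :: rest) 1 : Int) = 0 := by
          have := hc 0; rw [this, cnt_zero]; simp
        rw [h01] at h2; omega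
      · have := ih (j + 1) inst i' hlt
          (by rw [hc i'] at h1; exact h1)
          (by rw [hc (i' + 1)] at h2; exact h2)
        rw [this]; congr 1; push_cast; ring_nf

-- the cum list built by B's fold
theorem cumFold (s : String) :
    ∀ (ls : List String) (c : List Int) (hc : c ≠ []),
      ls.foldl (fun c line => c ++ [(PySem.List.pyGet? c (-1)).getD 0 + (if isSec s line then 1 else 0)]) c
        = c ++ (List.range ls.length).map
            (fun k => c.getLast hc + (cnt s ls (k + 1) : Int)) := by
  intro ls
  induction ls with
  | nil => intro c hc; simp
  | cons x rest ih =>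
    intro c hc
    rw [List.foldl_cons]
    have hlast : (PySem.List.pyGet? c (-1)).getD 0 = c.getLast hc := by
      rw [PySem.List.pyGet?_neg_one, List.getLast?_eq_some_getLast (h := hc), Option.getD_some]
    set b : Int := if isSec s x then 1 else 0 with hb
    rw [hlast, ih (c ++ [c.getLast hc + b]) (by simp)]
    have hlast2 : (c ++ [c.getLast hc + b]).getLast (by simp) = c.getLast hc + b := by
      simp
    rw [hlast2, List.length_cons, List.range_succ_eq_map, List.map_cons, List.map_map,
      List.append_assoc, List.singleton_append]
    have hcnt1 : (cnt s (x :: rest) 1 : Int) = b := by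
      rw [hb]; simp only [cnt, List.take_succ_cons, List.take_zero, List.countP_cons, List.countP_nil]
      by_cases hpx : isSec s x <;> simp [hpx] <;> omega
    congr 1
    congr 1
    · rw [hcnt1]
    apply List.map_congr_left
    intro k _
    simp only [Function.comp_apply]
    have : cnt s (x :: rest) (k + 1 + 1) = cnt s rest (k + 1) + (if isSec s x then 1 else 0) := by
      simp only [cnt, List.take_succ_cons, List.countP_cons]
    rw [this, hb]
    by_cases hpx : isSec s x <;> simp [hpx] <;> omega

-- indexing cum: cum[k] = cnt k for 0 ≤ k ≤ n
theorem cum_get (s : String) (ls : List String) (k : Nat) (hk : k ≤ ls.length) :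
    (PySem.List.pyGet? (ls.foldl (fun c line => c ++ [(PySem.List.pyGet? c (-1)).getD 0 + (if isSec s line then 1 else 0)]) [0]) (k : Int)).getD 0
      = (cnt s ls k : Int) := by
  rw [cumFold s ls [0] (by simp), PySem.List.pyGet?_natCast]
  simp only [List.getLast_singleton, List.singleton_append]
  rcases k with _ | k'
  · simp [cnt_zero]
  · have hlt : k' < ls.length := by omega
    rw [List.getElem?_cons_succ, List.getElem?_map, List.getElem?_range hlt]
    simp

-- binary search returns the unique index where cnt first reaches t
theorem bsearch_correct (s : String) (ls : List String) (t : Int) :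
    ∀ (lo hi : Int), 0 ≤ lo → lo ≤ hi → hi ≤ (ls.length : Int) - 1 →
      (cnt s ls lo.toNat : Int) < t →
      t ≤ (cnt s ls (hi.toNat + 1) : Int) →
      let cum := ls.foldl (fun c line => c ++ [(PySem.List.pyGet? c (-1)).getD 0 + (if isSec s line then 1 else 0)]) [0]
      0 ≤ bsearch cum t lo hi ∧ bsearch cum t lo hi ≤ (ls.length : Int) - 1 ∧
      (cnt s ls (bsearch cum t lo hi).toNat : Int) < t ∧
      t ≤ (cnt s ls ((bsearch cum t lo hi).toNat + 1) : Int) := by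
  intro lo hi
  induction lo, hi using bsearch.induct (cum := ls.foldl (fun c line => c ++ [(PySem.List.pyGet? c (-1)).getD 0 + (if isSec s line then 1 else 0)]) [0]) (t := t) with
  | case1 lo hi h mid hge ih =>
    intro h0 hle hhi hclo hchi cum
    have hmid := PySem.Int.floordiv_two_mid_bounds (le_of_lt h)
    have hmidlt : mid < hi := by
      show PySem.Int.floordiv (lo + hi) 2 < hi
      rw [PySem.Int.floordiv_eq_ediv_of_pos (by omega)]; omega
    have hmge : (cnt s ls (mid.toNat + 1) : Int) ≥ t := by
      have hcast : ((mid.toNat + 1 : Nat) : Int) = mid + 1 := by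
        have : 0 ≤ mid := le_trans h0 hmid.1; omega
      rw [← hcast] at hge
      rw [cum_get s ls (mid.toNat + 1) (by omega)] at hge
      exact hge
    rw [show bsearch cum t lo hi = bsearch cum t lo mid from by
      rw [bsearch]; rw [dif_pos h, if_pos hge]]
    exact ih (by omega) hmid.1 (by omega) hclo hmge
  | case2 lo hi h mid hge ih =>
    intro h0 hle hhi hclo hchi cum
    have hmid := PySem.Int.floordiv_two_mid_bounds (le_of_lt h)
    have hmidlt : mid < hi := by
      show PySem.Int.floordiv (lo + hi) 2 < hi
      rw [PySem.Int.floordiv_eq_ediv_of_pos (by omega)]; omega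
    rw [show bsearch cum t lo hi = bsearch cum t (mid + 1) hi from by
      rw [bsearch]; rw [dif_pos h, if_neg hge]]
    have hmlt : (cnt s ls ((mid + 1).toNat) : Int) < t := by
      have hcast : (((mid + 1).toNat : Nat) : Int) = mid + 1 := by
        have : 0 ≤ mid := le_trans h0 hmid.1; omega
      rw [not_le, ← hcast] at hge
      rw [cum_get s ls (mid + 1).toNat (by omega)] at hge
      exact hge
    exact ih (by omega) (by omega) hhi hmlt hchi
  | case3 lo hi h =>
    intro h0 hle hhi hclo hchi cum
    have hlohi : lo = hi := by omega
    subst hlohi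
    rw [show bsearch cum t lo lo = lo from by rw [bsearch]; rw [dif_neg (lt_irrefl lo)]]
    exact ⟨h0, hhi, hclo, hchi⟩

theorem cnt_full (s : String) (ls : List String) : cnt s ls ls.length = ls.countP (fun l => isSec s l) := by
  simp [cnt]

-- ===== VERDICT (by name: the statement is the Claim_ definition above) =====
theorem find_spec : Claim_equal_find := by
  intro lines s t _ hpre
  obtain ⟨h1, h2⟩ := hpre
  unfold Spec_find find
  simp only [find_alt]
  set cum : List Int := lines.foldl (fun c line => c ++ [(PySem.List.pyGet? c (-1)).getD 0 + (if isSec s line then 1 else 0)]) [0] with hcum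
  have hn : 1 ≤ lines.length := by
    by_contra hn
    have : lines = [] := by
      cases lines with | nil => rfl | cons a l => exact absurd (by simp) hn
    rw [this] at h2; simp at h2; omega
  have hlen : cum.length = lines.length + 1 := by
    rw [hcum, cumFold s lines [0] (by simp)]; simp
  have htotal : (PySem.List.pyGet? cum (-1)).getD 0 = (lines.countP (fun l => isSec s l) : Int) := by
    have hng := cum_get s lines lines.length (le_refl _)
    rw [PySem.List.pyGet?_natCast] at hng
    rw [← hcum] at hng
    rw [PySem.List.pyGet?_neg_one, List.getLast?_eq_getElem?, hlen,
      show lines.length + 1 - 1 = lines.length from rfl, hng, cnt_full]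
  rw [if_pos (by rw [htotal]; exact ⟨h1, h2⟩)]
  have hbs := bsearch_correct s lines t 0 ((lines.length : Int) - 1)
    (by omega) (by omega) (le_refl _)
    (by rw [show ((0 : Int)).toNat = 0 from rfl, cnt_zero]; omega)
    (by rw [show (((lines.length : Int) - 1).toNat + 1) = lines.length from by omega, cnt_full]; exact h2)
  rw [← hcum] at hbs
  obtain ⟨hb0, hbn, hblt, hbge⟩ := hbs
  set r := bsearch cum t 0 ((lines.length : Int) - 1) with hr
  have hloop := loopA s t lines 0 0 r.toNat (by omega)
    (by omega) (by omega)
  rw [hloop]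
  simp only [Option.getD_some]
  rw [show ((0 : Int) + (r.toNat : Int)) = r from by omega]
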